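-- pv_equiv track=rewrite | github.com/TaheralKahir/TheorieDesJeux | Jeu des Pousses/Test/test.py | n_faces
-- ===== SOURCE A (Python) =====
-- def n_faces(M):
--     n = len(M)
--     u = 0
--     for i in range(n-2):
--         if sum(M[i]) < sum(M[i+1]):
--             u = sum(M[i+1])
--         elif sum(M[i]) > sum(M[i+1]):
--             u = sum(M[i])
--     return u+1
-- ===== SOURCE B (Python) =====
-- def n_faces(M):
--     s = [sum(row) for row in M]
--     for i in range(len(s) - 3, -1, -1):
--         if s[i] != s[i + 1]:
--             return max(s[i], s[i + 1]) + 1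
--     return 1
-- ===== Notes on version B (the rewrite author's own statement) =====
-- stated objective: faster
-- what changed: B precomputes each row sum exactly once into a table and scans it backward with an early exit at the first differing adjacent pair (whose max+1 is A's answer, since A keeps the last differing forward pair), instead of A's full forward scan that recomputes each row sum up to four times.
import Mathlib
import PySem

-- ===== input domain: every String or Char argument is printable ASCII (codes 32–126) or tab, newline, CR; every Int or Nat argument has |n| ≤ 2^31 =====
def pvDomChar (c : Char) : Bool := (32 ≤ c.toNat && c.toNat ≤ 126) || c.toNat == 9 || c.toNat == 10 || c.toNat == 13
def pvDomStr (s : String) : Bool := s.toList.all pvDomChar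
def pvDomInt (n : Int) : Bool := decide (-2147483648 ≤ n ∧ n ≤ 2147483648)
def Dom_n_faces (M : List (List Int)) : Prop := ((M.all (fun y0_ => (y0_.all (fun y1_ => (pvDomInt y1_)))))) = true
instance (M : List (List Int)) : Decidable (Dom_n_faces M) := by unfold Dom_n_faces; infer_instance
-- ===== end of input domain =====

-- B builds the row-sum table once and scans it backward with an early exit; equal return value proved, objective: alternative decomposition.

-- ===== PORT A =====
-- Python's sum(list) over ints
def pysum (l : List Int) : Int := l.foldl (· + ·) 0

def n_faces (M : List (List Int)) : Int :=
  let n := M.length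
  let u := (List.range (n - 2)).foldl
    (fun u i =>
      if pysum (M.getD i []) < pysum (M.getD (i + 1) []) then pysum (M.getD (i + 1) [])
      else if pysum (M.getD i []) > pysum (M.getD (i + 1) []) then pysum (M.getD i [])
      else u) 0
  u + 1

-- ===== PORT B =====
-- the backward early-exit loop of Source B, current index k going down to 0
def nfacesGo (s : List Int) : Nat → Int
  | 0 => if s.getD 0 0 ≠ s.getD 1 0 then max (s.getD 0 0) (s.getD 1 0) + 1 else 1
  | k + 1 =>
      if s.getD (k + 1) 0 ≠ s.getD (k + 2) 0 then max (s.getD (k + 1) 0) (s.getD (k + 2) 0) + 1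
      else nfacesGo s k

def n_faces_alt (M : List (List Int)) : Int :=
  let s := M.map pysum
  if s.length ≥ 3 then nfacesGo s (s.length - 3) else 1

-- ===== PRECONDITION & SPEC =====
def Spec_n_faces (M : List (List Int)) (out : Int) : Prop := out = n_faces_alt M
instance (M : List (List Int)) (out : Int) : Decidable (Spec_n_faces M out) := by unfold Spec_n_faces; infer_instance

-- ===== CLAIM (what is proved, stated in full; the proofs are below) =====
def Claim_equal_n_faces : Prop := ∀ (M : List (List Int)), Dom_n_faces M → Spec_n_faces M (n_faces M)

-- ===== LEMMAS AND PROOFS =====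

theorem getD_map_pysum (M : List (List Int)) (i : Nat) (h : i < M.length) :
    (M.map pysum).getD i 0 = pysum (M.getD i []) := by
  simp [List.getD_eq_getElem?_getD, List.getElem?_map, List.getElem?_eq_getElem (l := M) h]

theorem key (M : List (List Int)) (k : Nat) (h : k + 2 ≤ M.length) :
    (List.range (k + 1)).foldl
      (fun u i =>
        if pysum (M.getD i []) < pysum (M.getD (i + 1) []) then pysum (M.getD (i + 1) [])
        else if pysum (M.getD i []) > pysum (M.getD (i + 1) []) then pysum (M.getD i [])
        else u) 0 + 1 = nfacesGo (M.map pysum) k := by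
  induction k with
  | zero =>
    have h0 : (0 : Nat) < M.length := by omega
    have h1 : (1 : Nat) < M.length := by omega
    rw [List.range_succ, List.foldl_append, List.range_zero, List.foldl_nil, List.foldl_cons,
      List.foldl_nil, nfacesGo, getD_map_pysum M 0 h0, getD_map_pysum M 1 h1]
    rcases lt_trichotomy (pysum (M.getD 0 [])) (pysum (M.getD 1 [])) with hlt | heq | hgt
    · rw [if_pos hlt, if_pos (ne_of_lt hlt), max_eq_right hlt.le]
    · rw [if_neg (heq ▸ lt_irrefl _), if_neg (heq ▸ lt_irrefl _),
        if_neg (not_not_intro heq)]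
      norm_num
    · rw [if_neg (not_lt_of_gt hgt), if_pos hgt, if_pos (ne_of_lt hgt).symm,
        max_eq_left hgt.le]
  | succ k ih =>
    have hk : k + 2 ≤ M.length := by omega
    have h0 : k + 1 < M.length := by omega
    have h1 : k + 2 < M.length := by omega
    rw [List.range_succ, List.foldl_append, List.foldl_cons, List.foldl_nil, nfacesGo,
      getD_map_pysum M (k + 1) h0]
    have h2 : (M.map pysum).getD (k + 2) 0 = pysum (M.getD (k + 2) []) :=
      getD_map_pysum M (k + 2) h1
    rw [show k + 1 + 1 = k + 2 from rfl, h2]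
    rcases lt_trichotomy (pysum (M.getD (k + 1) [])) (pysum (M.getD (k + 2) [])) with hlt | heq | hgt
    · rw [if_pos hlt, if_pos (ne_of_lt hlt), max_eq_right hlt.le]
    · rw [if_neg (heq ▸ lt_irrefl _), if_neg (heq ▸ lt_irrefl _),
        if_neg (not_not_intro heq), ih hk]
    · rw [if_neg (not_lt_of_gt hgt), if_pos hgt, if_pos (ne_of_lt hgt).symm,
        max_eq_left hgt.le]

-- ===== VERDICT (by name: the statement is the Claim_ definition above) =====
theorem n_faces_spec : Claim_equal_n_faces := by
  intro M _
  unfold Spec_n_faces n_faces n_faces_alt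
  simp only [List.length_map]
  by_cases h : M.length ≥ 3
  · rw [if_pos h]
    have hk : M.length - 2 = (M.length - 3) + 1 := by omega
    rw [hk]
    exact key M (M.length - 3) (by omega)
  · rw [if_neg h]
    have : M.length - 2 = 0 := by omega
    simp [this]
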